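-- pv_equiv track=rewrite | github.com/filip-husnik/pseudofinder | modules/sleuth.py | stopfinder
-- ===== SOURCE A (Python) =====
-- def stopfinder(seq):
--     newseq = ''
--     gaps = ''
--     for i in seq:
--         if i != '-':
--             newseq += gaps
--             newseq += i
--             gaps = ''
--         else:
--             gaps += i
--     return newseq, len(gaps)
-- ===== SOURCE B (Python) =====
-- def stopfinder(seq):
--     # count trailing gaps from the right, then cut them off
--     k = 0
--     for ch in reversed(seq):
--         if ch != '-':
--             break
--         k += 1
--     return seq[:len(seq) - k], k
-- ===== Notes on version B (the rewrite author's own statement) =====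
-- stated objective: simpler
-- what changed: Instead of a forward accumulator pass that buffers each gap run and re-appends it before the next non-gap character via repeated string concatenation, B scans once from the right to count the trailing gap run and returns the sliced prefix with that count.
import Mathlib
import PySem

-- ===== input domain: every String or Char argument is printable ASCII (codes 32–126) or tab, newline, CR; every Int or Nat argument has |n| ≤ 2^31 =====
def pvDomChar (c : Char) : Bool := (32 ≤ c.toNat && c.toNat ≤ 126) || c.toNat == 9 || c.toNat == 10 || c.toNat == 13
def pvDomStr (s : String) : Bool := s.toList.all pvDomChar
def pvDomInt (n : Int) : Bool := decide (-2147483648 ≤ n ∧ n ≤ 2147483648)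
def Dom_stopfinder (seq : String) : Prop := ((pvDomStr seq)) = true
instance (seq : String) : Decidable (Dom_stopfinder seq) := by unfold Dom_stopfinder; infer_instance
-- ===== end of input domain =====

-- B counts the trailing gap run with one reverse scan and slices it off, instead of A's forward pass that buffers gap runs and re-appends them; objective: simpler.


-- ===== PORT A =====
-- A's loop: state (newseq, gaps); non-dash flushes the buffered gap run then appends the char.
def stopfinderStep (p : List Char × List Char) (i : Char) : List Char × List Char :=
  if i ≠ '-' then (p.1 ++ p.2 ++ [i], []) else (p.1, p.2 ++ [i])

def stopfinder (seq : String) : String × Int :=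
  let st := seq.toList.foldl stopfinderStep ([], [])
  (String.mk st.1, (st.2.length : Int))

-- ===== PORT B =====
-- Source B's reversed() loop: count leading dashes of the reversed character list, breaking at the first non-dash.
def trailGaps : List Char → Nat
  | [] => 0
  | c :: t => if c ≠ '-' then 0 else trailGaps t + 1

-- seq[:len(seq)-k] with 0 ≤ len-k ≤ len is exactly List.take (len - k).
def stopfinder_alt (seq : String) : String × Int :=
  let k := trailGaps seq.toList.reverse
  (String.mk (seq.toList.take (seq.toList.length - k)), (k : Int))

-- ===== PRECONDITION & SPEC =====
def Spec_stopfinder (seq : String) (out : String × Int) : Prop := out = stopfinder_alt seq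
instance (seq : String) (out : String × Int) : Decidable (Spec_stopfinder seq out) := by unfold Spec_stopfinder; infer_instance

-- ===== CLAIM (what is proved, stated in full; the proofs are below) =====
def Claim_equal_stopfinder : Prop := ∀ (seq : String), Dom_stopfinder seq → Spec_stopfinder seq (stopfinder seq)

-- ===== LEMMAS AND PROOFS =====

theorem trailGaps_le (r : List Char) : trailGaps r ≤ r.length := by
  induction r with
  | nil => simp [trailGaps]
  | cons c t ih => by_cases h : c = '-' <;> simp [trailGaps, h] <;> omega

theorem take_trailGaps (r : List Char) : r.take (trailGaps r) = List.replicate (trailGaps r) '-' := by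
  induction r with
  | nil => simp [trailGaps]
  | cons c t ih =>
    by_cases h : c = '-'
    · simp [trailGaps, h, List.replicate_succ, ih]
    · simp [trailGaps, h]

theorem drop_trailGaps (l : List Char) :
    l.drop (l.length - trailGaps l.reverse) = List.replicate (trailGaps l.reverse) '-' := by
  have hk := trailGaps_le l.reverse
  have h1 : l.reverse.take (trailGaps l.reverse) = List.replicate (trailGaps l.reverse) '-' :=
    take_trailGaps l.reverse
  have h2 : l.drop (l.length - trailGaps l.reverse) = (l.reverse.take (trailGaps l.reverse)).reverse := by
    rw [List.take_reverse]; simp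
  rw [h2, h1, List.reverse_replicate]

theorem foldl_stopfinder (l : List Char) :
    l.foldl stopfinderStep ([], []) =
      (l.take (l.length - trailGaps l.reverse), List.replicate (trailGaps l.reverse) '-') := by
  induction l using List.reverseRecOn with
  | nil => simp [trailGaps]
  | append_singleton l c ih =>
    rw [List.foldl_append, ih]
    by_cases h : c = '-'
    · have hk := trailGaps_le l.reverse
      simp [stopfinderStep, h, trailGaps, List.replicate_succ']
    · have hsplit : l.take (l.length - trailGaps l.reverse) ++ List.replicate (trailGaps l.reverse) '-' = l := by
        conv_rhs => rw [← List.take_append_drop (l.length - trailGaps l.reverse) l]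
        rw [drop_trailGaps]
      simp [stopfinderStep, h, trailGaps, hsplit]

-- ===== VERDICT (by name: the statement is the Claim_ definition above) =====
theorem stopfinder_spec : Claim_equal_stopfinder := by
  intro seq _
  unfold Spec_stopfinder stopfinder stopfinder_alt
  rw [foldl_stopfinder]
  simp
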